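-- pv_equiv track=rewrite | github.com/luelista/pre_workbench | pre_workbench/guihelper.py | splitNavArgs
-- ===== SOURCE A (Python) =====
-- def splitNavArgs(args):
-- 	start = None
-- 	for i in range(len(args)):
-- 		if "=" not in args[i]:
-- 			if start is not None:
-- 				yield args[start:i]
-- 			start = i
-- 	if start is not None:
-- 		yield args[start:]
-- ===== SOURCE B (Python) =====
-- def splitNavArgs(args):
-- 	bounds = [i for i, a in enumerate(args) if "=" not in a]
-- 	for u, v in zip(bounds, bounds[1:]):
-- 		yield args[u:v]
-- 	if bounds:
-- 		yield args[bounds[-1]:]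
-- ===== Notes on version B (the rewrite author's own statement) =====
-- stated objective: alternative
-- what changed: Replaces A's single interleaved start-tracking generator loop by a two-pass structure: first collect the boundary indices (tokens without '='), then yield slices between consecutive boundaries and a final open-ended slice.
import Mathlib
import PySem

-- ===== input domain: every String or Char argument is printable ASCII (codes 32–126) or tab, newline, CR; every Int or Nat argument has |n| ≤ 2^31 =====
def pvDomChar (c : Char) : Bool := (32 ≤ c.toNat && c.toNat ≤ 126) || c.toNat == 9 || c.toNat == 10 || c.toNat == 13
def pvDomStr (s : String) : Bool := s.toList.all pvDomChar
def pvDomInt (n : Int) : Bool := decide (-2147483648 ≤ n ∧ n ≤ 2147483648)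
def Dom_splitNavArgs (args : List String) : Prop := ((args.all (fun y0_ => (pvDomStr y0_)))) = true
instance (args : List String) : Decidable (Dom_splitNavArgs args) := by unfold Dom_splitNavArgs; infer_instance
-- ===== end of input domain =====

-- B replaces A's interleaved start-tracking generator loop by a boundary-index
-- table plus slicing over consecutive boundary pairs (objective: alternative,
-- same cost; both Pythons are generators, compared as the lists they yield).

-- ===== PORT A =====
-- the test '"=" not in args[i]' shared by both loop bodies
def pvPred (args : List String) (i : Int) : Bool :=
  !(PySem.Str.isIn "=" (PySem.List.pyGetD args i ""))

-- A's loop body: skip args[i] containing "=", else yield args[start:i] if a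
-- group is open and open a new group at i.
def pvStepA (args : List String) (st : Option Int × List (List String)) (i : Int) :
    Option Int × List (List String) :=
  if pvPred args i then
    match st.1 with
    | some s => (some i, st.2 ++ [PySem.List.slice args (some s) (some i)])
    | none   => (some i, st.2)
  else st

def splitNavArgs (args : List String) : List (List String) :=
  let r := (PySem.List.pyRange 0 (args.length : Int) 1).foldl (pvStepA args) (none, [])
  match r.1 with
  | some s => r.2 ++ [PySem.List.slice args (some s) none]   -- final "yield args[start:]"
  | none   => r.2

-- ===== PORT B =====
def splitNavArgs_alt (args : List String) : List (List String) :=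
  let bounds : List Int :=
    ((PySem.List.enumerate args 0).filter (fun p => !(PySem.Str.isIn "=" p.2))).map (·.1)
  ((bounds.zip (PySem.List.slice bounds (some 1) none)).map
      (fun p => PySem.List.slice args (some p.1) (some p.2)))
  ++ (match bounds.getLast? with           -- "if bounds: yield args[bounds[-1]:]"
      | some b => [PySem.List.slice args (some b) none]
      | none   => [])

-- ===== PRECONDITION & SPEC =====
def Spec_splitNavArgs (args : List String) (out : List (List String)) : Prop := out = splitNavArgs_alt args
instance (args : List String) (out : List (List String)) : Decidable (Spec_splitNavArgs args out) := by unfold Spec_splitNavArgs; infer_instance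

-- ===== CLAIM (what is proved, stated in full; the proofs are below) =====
def Claim_equal_splitNavArgs : Prop := ∀ (args : List String), Dom_splitNavArgs args → Spec_splitNavArgs args (splitNavArgs args)

-- ===== LEMMAS AND PROOFS =====

-- the groups produced from an open group at s with remaining boundaries bs
def pvAux (args : List String) (s : Int) : List Int → List (List String)
  | []      => [PySem.List.slice args (some s) none]
  | b :: bs => PySem.List.slice args (some s) (some b) :: pvAux args b bs

def pvFinish (args : List String) (r : Option Int × List (List String)) : List (List String) :=
  match r.1 with
  | some s => r.2 ++ [PySem.List.slice args (some s) none]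
  | none   => r.2

lemma pvLoop_some (args : List String) (l : List Int) :
    ∀ (s : Int) (out : List (List String)),
    pvFinish args (l.foldl (pvStepA args) (some s, out))
      = out ++ pvAux args s (l.filter (pvPred args)) := by
  induction l with
  | nil => intro s out; simp [pvFinish, pvAux]
  | cons i l ih =>
    intro s out
    by_cases h : pvPred args i
    · simp [pvStepA, h, ih, pvAux]
    · simp [pvStepA, h, ih]

lemma pvLoop_none (args : List String) (l : List Int) :
    ∀ (out : List (List String)),
    pvFinish args (l.foldl (pvStepA args) (none, out))
      = out ++ (match l.filter (pvPred args) with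
                | []      => []
                | b :: bs => pvAux args b bs) := by
  induction l with
  | nil => intro out; simp [pvFinish]
  | cons i l ih =>
    intro out
    by_cases h : pvPred args i
    · simp [pvStepA, h, pvLoop_some]
    · simp [pvStepA, h, ih]

lemma pvAux_eq_zip (args : List String) (bs : List Int) :
    ∀ (b : Int),
    pvAux args b bs
      = (((b :: bs).zip bs).map (fun p => PySem.List.slice args (some p.1) (some p.2)))
        ++ [PySem.List.slice args (some ((b :: bs).getLast (by simp))) none] := by
  induction bs with
  | nil => intro b; simp [pvAux]
  | cons c cs ih =>
    intro b
    simp [pvAux, ih c, List.zip]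

lemma pvBounds_eq (args : List String) :
    ((PySem.List.enumerate args 0).filter (fun p => !(PySem.Str.isIn "=" p.2))).map (·.1)
      = (PySem.List.pyRange 0 (args.length : Int) 1).filter (pvPred args) := by
  rw [PySem.List.enumerate_eq_map_pyRange (d := "")]
  rw [List.filter_map, List.map_map]
  simp only [Function.comp_def, List.map_id_fun', PySem.List.len]
  apply List.filter_congr
  intro x _
  simp [pvPred, PySem.Str.isIn]

-- ===== VERDICT (by name: the statement is the Claim_ definition above) =====
theorem splitNavArgs_spec : Claim_equal_splitNavArgs := by
  intro args _
  show splitNavArgs args = splitNavArgs_alt args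
  have lhs : splitNavArgs args
      = pvFinish args ((PySem.List.pyRange 0 (args.length : Int) 1).foldl (pvStepA args) (none, [])) := rfl
  rw [lhs, pvLoop_none]
  unfold splitNavArgs_alt
  rw [pvBounds_eq]
  cases hbs : (PySem.List.pyRange 0 (args.length : Int) 1).filter (pvPred args) with
  | nil => simp
  | cons b rest =>
    simp [pvAux_eq_zip, PySem.List.slice_from_one, List.getLast?_eq_some_getLast (l := b :: rest) (by simp)]
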